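-- pv_equiv track=rewrite | github.com/txbabaxyz/mlmodelpoly | src/collector/taapi/context_engine.py | _compute_alignment_score
-- ===== SOURCE A (Python) =====
-- def _compute_alignment_score(
--
--     bias_1h: str,
--     bias_15m: str,
--     bias_5m: str,
--     bias_1m: str,
-- ) -> int:
--     """
--     Compute alignment score (0-100).
--
--     Measures how well timeframes agree on direction.
--
--     Args:
--         bias_1h: 1h bias
--         bias_15m: 15m bias
--         bias_5m: 5m bias
--         bias_1m: 1m bias
--
--     Returns:
--         Score 0-100
--     """
--     # Weight by timeframe importance
--     weights = {
--         "1h": 40,    # Background has highest weight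
--         "15m": 30,   # Main window
--         "5m": 20,    # Local structure
--         "1m": 10,    # Micro (least weight)
--     }
--
--     biases = {
--         "1h": bias_1h,
--         "15m": bias_15m,
--         "5m": bias_5m,
--         "1m": bias_1m,
--     }
--
--     # Determine dominant direction
--     up_weight = sum(weights[tf] for tf, b in biases.items() if b == "UP")
--     down_weight = sum(weights[tf] for tf, b in biases.items() if b == "DOWN")
--
--     # Score is the dominant direction's weight
--     return max(up_weight, down_weight)
-- ===== SOURCE B (Python) =====
-- def _compute_alignment_score(
--     bias_1h: str,
--     bias_15m: str,
--     bias_5m: str,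
--     bias_1m: str,
-- ) -> int:
--     # Signed-difference trick: one pass accumulates d = up - down (UP adds +w,
--     # DOWN adds -w) and t = up + down (either direction adds +w).  Then
--     # max(up, down) = (t + |d|) // 2, a closed form instead of two tallies + max.
--     d = 0
--     t = 0
--     for b, w in ((bias_1h, 40), (bias_15m, 30), (bias_5m, 20), (bias_1m, 10)):
--         if b == "UP":
--             d += w
--             t += w
--         elif b == "DOWN":
--             d -= w
--             t += w
--     return (t + abs(d)) // 2
-- ===== Notes on version B (the rewrite author's own statement) =====
-- stated objective: alternative
-- what changed: B accumulates in one signed pass the difference d = up - down and the total t = up + down, and returns the closed form (t + |d|) // 2, instead of A's two separately filtered weight sums followed by max.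
import Mathlib
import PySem

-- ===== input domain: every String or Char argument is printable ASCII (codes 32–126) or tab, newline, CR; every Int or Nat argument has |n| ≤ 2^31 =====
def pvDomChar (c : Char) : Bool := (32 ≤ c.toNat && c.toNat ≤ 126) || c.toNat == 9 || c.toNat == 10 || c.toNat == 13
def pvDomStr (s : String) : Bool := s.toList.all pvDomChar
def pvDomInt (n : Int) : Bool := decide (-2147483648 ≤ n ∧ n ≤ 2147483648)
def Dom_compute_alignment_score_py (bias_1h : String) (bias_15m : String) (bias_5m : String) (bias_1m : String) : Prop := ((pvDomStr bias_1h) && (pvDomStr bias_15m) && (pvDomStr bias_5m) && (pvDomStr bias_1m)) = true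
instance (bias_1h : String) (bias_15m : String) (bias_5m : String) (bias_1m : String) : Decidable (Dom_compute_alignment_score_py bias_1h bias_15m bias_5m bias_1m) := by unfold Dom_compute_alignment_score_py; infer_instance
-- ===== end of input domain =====

-- B replaces A's two filtered sums + max by one signed pass (d = up - down, t = up + down) and the closed form (t + |d|) // 2 (objective: alternative).
-- ===== PORT A =====
def compute_alignment_score_py (bias_1h : String) (bias_15m : String) (bias_5m : String) (bias_1m : String) : Int :=
  let weights : PySem.Dict String Int :=
    PySem.Dict.ofList [("1h", 40), ("15m", 30), ("5m", 20), ("1m", 10)]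
  let biases : PySem.Dict String String :=
    PySem.Dict.ofList [("1h", bias_1h), ("15m", bias_15m), ("5m", bias_5m), ("1m", bias_1m)]
  -- weights[tf]: every tf iterated over is a key of weights, so the lookup never raises; getD _ 0 is exact here
  let up_weight : Int :=
    ((biases.items.filter (fun p => p.2 == "UP")).map (fun p => weights.getD p.1 0)).sum
  let down_weight : Int :=
    ((biases.items.filter (fun p => p.2 == "DOWN")).map (fun p => weights.getD p.1 0)).sum
  max up_weight down_weight

-- ===== PORT B =====
def compute_alignment_score_py_alt (bias_1h : String) (bias_15m : String) (bias_5m : String) (bias_1m : String) : Int :=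
  let st : Int × Int :=
    [(bias_1h, (40 : Int)), (bias_15m, 30), (bias_5m, 20), (bias_1m, 10)].foldl
      (fun (st : Int × Int) p =>
        if p.1 == "UP" then (st.1 + p.2, st.2 + p.2)
        else if p.1 == "DOWN" then (st.1 - p.2, st.2 + p.2)
        else st)
      (0, 0)
  PySem.Int.floordiv (st.2 + |st.1|) 2

-- ===== PRECONDITION & SPEC =====
def Spec_compute_alignment_score_py (bias_1h : String) (bias_15m : String) (bias_5m : String) (bias_1m : String) (out : Int) : Prop := out = compute_alignment_score_py_alt bias_1h bias_15m bias_5m bias_1m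
instance (bias_1h : String) (bias_15m : String) (bias_5m : String) (bias_1m : String) (out : Int) : Decidable (Spec_compute_alignment_score_py bias_1h bias_15m bias_5m bias_1m out) := by unfold Spec_compute_alignment_score_py; infer_instance

-- ===== CLAIM (what is proved, stated in full; the proofs are below) =====
def Claim_equal_compute_alignment_score_py : Prop := ∀ (bias_1h : String) (bias_15m : String) (bias_5m : String) (bias_1m : String), Dom_compute_alignment_score_py bias_1h bias_15m bias_5m bias_1m → Spec_compute_alignment_score_py bias_1h bias_15m bias_5m bias_1m (compute_alignment_score_py bias_1h bias_15m bias_5m bias_1m)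

-- ===== LEMMAS AND PROOFS =====

-- items of A's literal four-key dicts ("1h","15m","5m","1m" are distinct literals)
theorem items_ofList4 {v : Type} (v1 v2 v3 v4 : v) :
    (PySem.Dict.ofList [("1h", v1), ("15m", v2), ("5m", v3), ("1m", v4)]).items
      = [("1h", v1), ("15m", v2), ("5m", v3), ("1m", v4)] := by
  simp [PySem.Dict.ofList, PySem.Dict.update, PySem.Dict.insert, PySem.Dict.empty,
    PySem.Dict.contains]

-- every printable string is "UP", "DOWN", or neither (never both)
theorem pv_tri (b : String) :
    ((b == "UP") = true ∧ (b == "DOWN") = false)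
      ∨ ((b == "UP") = false ∧ (b == "DOWN") = true)
      ∨ ((b == "UP") = false ∧ (b == "DOWN") = false) := by
  cases e : b == "UP" <;> cases f : b == "DOWN" <;> simp_all

-- A's filtered weight sum for direction s, in closed form over the four biases
theorem sum_closed (s b1 b2 b3 b4 : String) :
    ((([("1h", b1), ("15m", b2), ("5m", b3), ("1m", b4)]).filter (fun p => p.2 == s)).map
        (fun p => (PySem.Dict.ofList [("1h", (40:Int)), ("15m", 30), ("5m", 20), ("1m", 10)]).getD p.1 0)).sum
      = (if b1 == s then (40:Int) else 0) + (if b2 == s then 30 else 0)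
        + (if b3 == s then 20 else 0) + (if b4 == s then 10 else 0) := by
  cases h1 : b1 == s <;> cases h2 : b2 == s <;> cases h3 : b3 == s <;> cases h4 : b4 == s <;>
    simp [List.filter, h1, h2, h3, h4] <;> decide

-- max via the signed-difference closed form
theorem max_floordiv (a b : Int) : max a b = PySem.Int.floordiv (a + b + |a - b|) 2 := by
  symm
  rw [PySem.Int.floordiv_eq_iff_of_pos (by norm_num)]
  rcases le_total a b with h | h
  · rw [abs_of_nonpos (by omega), max_eq_right h]; omega
  · rw [abs_of_nonneg (by omega), max_eq_left h]; omega

-- B's fold, in the same closed form (d = up - down, t = up + down)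
theorem alt_closed (b1 b2 b3 b4 : String) :
    compute_alignment_score_py_alt b1 b2 b3 b4
      = PySem.Int.floordiv
          ((if b1 == "UP" then (40:Int) else 0) + (if b2 == "UP" then 30 else 0)
              + (if b3 == "UP" then 20 else 0) + (if b4 == "UP" then 10 else 0)
            + ((if b1 == "DOWN" then (40:Int) else 0) + (if b2 == "DOWN" then 30 else 0)
              + (if b3 == "DOWN" then 20 else 0) + (if b4 == "DOWN" then 10 else 0))
            + |(if b1 == "UP" then (40:Int) else 0) + (if b2 == "UP" then 30 else 0)
              + (if b3 == "UP" then 20 else 0) + (if b4 == "UP" then 10 else 0)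
              - ((if b1 == "DOWN" then (40:Int) else 0) + (if b2 == "DOWN" then 30 else 0)
              + (if b3 == "DOWN" then 20 else 0) + (if b4 == "DOWN" then 10 else 0))|) 2 := by
  rcases pv_tri b1 with ⟨h1, h1'⟩ | ⟨h1, h1'⟩ | ⟨h1, h1'⟩ <;>
    rcases pv_tri b2 with ⟨h2, h2'⟩ | ⟨h2, h2'⟩ | ⟨h2, h2'⟩ <;>
    rcases pv_tri b3 with ⟨h3, h3'⟩ | ⟨h3, h3'⟩ | ⟨h3, h3'⟩ <;>
    rcases pv_tri b4 with ⟨h4, h4'⟩ | ⟨h4, h4'⟩ | ⟨h4, h4'⟩ <;>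
    simp [compute_alignment_score_py_alt, List.foldl, h1, h1', h2, h2', h3, h3', h4, h4']

-- ===== VERDICT (by name: the statement is the Claim_ definition above) =====
theorem compute_alignment_score_py_spec : Claim_equal_compute_alignment_score_py := by
  intro b1 b2 b3 b4 _
  unfold Spec_compute_alignment_score_py
  simp only [compute_alignment_score_py, items_ofList4]
  rw [sum_closed, sum_closed, max_floordiv, alt_closed]
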